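-- pv_equiv track=rewrite | github.com/orbitfin/orbitkit | orbitkit/id_srv/id_gen.py | _convert_10_2_60
-- ===== SOURCE A (Python) =====
-- from typing import Optional
--
-- printable_char_no_0_1 = [
--     "2", "3", "4", "5", "6", "7", "8", "9",
--     "a", "b", "c", "d", "e", "f", "g", "h", "i", "j", "k", "l", "m", "n", "o", "p", "q", "r", "s", "t", "u", "v", "w", "x", "y", "z",
--     "A", "B", "C", "D", "E", "F", "G", "H", "I", "J", "K", "L", "M", "N", "O", "P", "Q", "R", "S", "T", "U", "V", "W", "X", "Y", "Z",
-- ]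
--
-- def _convert_10_2_60(id_16: str, padding: Optional[int]):
--     _tmp_id_10 = int(id_16, 16)
--
--     output = ""
--     while _tmp_id_10:
--         _tmp_id_10, digit = divmod(_tmp_id_10, 60)
--         output += printable_char_no_0_1[digit]
--     if padding:
--         remainder = max(padding - len(output), 0)
--         output = output + "0" * remainder
--
--     return output[::-1]
-- ===== SOURCE B (Python) =====
-- printable_char_no_0_1 = [
--     "2", "3", "4", "5", "6", "7", "8", "9",
--     "a", "b", "c", "d", "e", "f", "g", "h", "i", "j", "k", "l", "m", "n", "o", "p", "q", "r", "s", "t", "u", "v", "w", "x", "y", "z",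
--     "A", "B", "C", "D", "E", "F", "G", "H", "I", "J", "K", "L", "M", "N", "O", "P", "Q", "R", "S", "T", "U", "V", "W", "X", "Y", "Z",
-- ]
--
--
-- def _convert_10_2_60(id_16, padding):
--     n = int(id_16, 16)
--     out = ""
--     if n:
--         # largest power of 60 not exceeding n
--         p = 1
--         while p <= n // 60:
--             p *= 60
--         # extract digits most-significant-first
--         while p:
--             out += printable_char_no_0_1[n // p]
--             n %= p
--             p //= 60
--     if padding:
--         out = "0" * max(padding - len(out), 0) + out
--     return out
-- ===== Notes on version B (the rewrite author's own statement) =====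
-- stated objective: alternative
-- what changed: B extracts base-60 digits most-significant-first (find the largest power of 60 <= n, then peel off the leading digit with n//p, n%=p, p//=60) and prepends the zero padding, instead of A's least-significant-first divmod loop that appends padding and reverses the whole string at the end; it trades A's small divmod-by-60 steps for division by large powers of 60.
import Mathlib
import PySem

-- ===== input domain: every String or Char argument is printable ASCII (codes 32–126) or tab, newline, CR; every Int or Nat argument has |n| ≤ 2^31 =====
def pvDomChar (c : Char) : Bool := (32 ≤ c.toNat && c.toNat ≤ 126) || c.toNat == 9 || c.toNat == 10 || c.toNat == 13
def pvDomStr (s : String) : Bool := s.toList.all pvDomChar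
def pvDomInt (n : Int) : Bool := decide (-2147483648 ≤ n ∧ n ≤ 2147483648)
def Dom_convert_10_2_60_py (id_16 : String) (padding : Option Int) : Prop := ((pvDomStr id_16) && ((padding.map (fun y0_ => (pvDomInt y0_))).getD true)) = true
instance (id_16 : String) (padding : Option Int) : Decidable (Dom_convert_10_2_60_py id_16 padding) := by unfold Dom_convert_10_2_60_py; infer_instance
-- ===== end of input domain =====

-- B extracts the base-60 digits most-significant-first (largest power of 60, then peel off
-- leading digits) and prepends the zero padding, instead of A's least-significant-first
-- divmod loop that appends the padding and reverses the whole string at the end.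

-- printable_char_no_0_1, as a list of chars (each Python entry is a 1-char string)
def pvTable60 : List Char :=
  ['2', '3', '4', '5', '6', '7', '8', '9', 'a', 'b', 'c', 'd', 'e', 'f', 'g', 'h', 'i', 'j', 'k', 'l', 'm', 'n', 'o', 'p', 'q', 'r', 's', 't', 'u', 'v', 'w', 'x', 'y', 'z', 'A', 'B', 'C', 'D', 'E', 'F', 'G', 'H', 'I', 'J', 'K', 'L', 'M', 'N', 'O', 'P', 'Q', 'R', 'S', 'T', 'U', 'V', 'W', 'X', 'Y', 'Z']

-- ===== PORT A =====
-- A's while loop: pop digits least-significant-first with divmod(n, 60), append to the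
-- accumulator.  (On a negative value the Python loop never terminates; Pre_ excludes that,
-- so the loop is stated on Nat.)
def pvLoopA : Nat → List Char → List Char
  | 0, acc => acc
  | m + 1, acc => pvLoopA ((m + 1) / 60) (acc ++ [pvTable60.getD ((m + 1) % 60) ' '])
  decreasing_by exact Nat.div_lt_self (Nat.succ_pos m) (by omega)

def convert_10_2_60_py (id_16 : String) (padding : Option Int) : String :=
  match PySem.Int.ofStrBase? id_16 16 with
  | none => ""                      -- int() raises ValueError: excluded by Pre_
  | some n =>
    let output := pvLoopA n.toNat []
    let output :=
      match padding with
      | none => output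
      | some p =>                   -- 'if padding:' — truthy iff not None and ≠ 0
        if p ≠ 0 then output ++ List.replicate (max (p - output.length) 0).toNat '0'
        else output
    String.ofList output.reverse    -- output[::-1]

-- ===== PORT B =====
-- B's first loop: largest power of 60 not exceeding n ('while p <= n // 60: p *= 60';
-- the 0 < p conjunct only guards termination — Python's p is always ≥ 1 here).
def pvPowLoop (n p : Nat) : Nat :=
  if _h : 0 < p ∧ p ≤ n / 60 then pvPowLoop n (p * 60) else p
  termination_by n / 60 + 1 - p
  decreasing_by omega

-- B's second loop: peel off digits most-significant-first ('while p: out += tbl[n // p]; n %= p; p //= 60').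
def pvMsdLoop : Nat → Nat → List Char → List Char
  | n, p, acc =>
    if _h : p ≠ 0 then pvMsdLoop (n % p) (p / 60) (acc ++ [pvTable60.getD (n / p) ' '])
    else acc
  termination_by _ p _ => p
  decreasing_by exact Nat.div_lt_self (by omega) (by omega)

def convert_10_2_60_py_alt (id_16 : String) (padding : Option Int) : String :=
  match PySem.Int.ofStrBase? id_16 16 with
  | none => ""                      -- int() raises ValueError: excluded by Pre_
  | some n0 =>
    let n := n0.toNat
    let out : List Char := if n ≠ 0 then pvMsdLoop n (pvPowLoop n 1) [] else []
    match padding with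
    | none => String.ofList out
    | some p =>
      if p ≠ 0 then String.ofList (List.replicate (max (p - out.length) 0).toNat '0' ++ out)
      else String.ofList out

-- ===== PRECONDITION & SPEC =====
-- Pre_ excludes exactly the inputs on which A does not return: strings int(·,16) rejects
-- (ValueError) and strings parsing to a negative value (A's divmod loop never terminates).
def Pre_convert_10_2_60_py (id_16 : String) (padding : Option Int) : Prop :=
  ∃ n : Int, PySem.Int.ofStrBase? id_16 16 = some n ∧ 0 ≤ n
instance (id_16 : String) (_padding : Option Int) : Decidable (Pre_convert_10_2_60_py id_16 _padding) := by
  unfold Pre_convert_10_2_60_py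
  exact match h : PySem.Int.ofStrBase? id_16 16 with
    | none => isFalse (by simp)
    | some n => decidable_of_iff (0 ≤ n) (by simp)

def pvWitness_convert_10_2_60_py : String × Option Int := ("ff", some 3)

def Spec_convert_10_2_60_py (id_16 : String) (padding : Option Int) (out : String) : Prop := out = convert_10_2_60_py_alt id_16 padding
instance (id_16 : String) (padding : Option Int) (out : String) : Decidable (Spec_convert_10_2_60_py id_16 padding out) := by unfold Spec_convert_10_2_60_py; infer_instance

-- ===== CLAIM (what is proved, stated in full; the proofs are below) =====
def Claim_equal_convert_10_2_60_py : Prop := ∀ (id_16 : String) (padding : Option Int), Dom_convert_10_2_60_py id_16 padding → Pre_convert_10_2_60_py id_16 padding → Spec_convert_10_2_60_py id_16 padding (convert_10_2_60_py id_16 padding)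

-- ===== LEMMAS AND PROOFS =====
-- Proof-side middleman: the most-significant-first digit string of n (empty for 0).
def pvDigits60 : Nat → List Char
  | 0 => []
  | m + 1 => pvDigits60 ((m + 1) / 60) ++ [pvTable60.getD ((m + 1) % 60) ' ']
  decreasing_by exact Nat.div_lt_self (Nat.succ_pos m) (by omega)

-- A's accumulator holds the reverse of the most-significant-first digits.
theorem pvLoopA_eq (m : Nat) : ∀ acc, pvLoopA m acc = acc ++ (pvDigits60 m).reverse := by
  induction m using Nat.strong_induction_on with
  | _ m ih =>
    intro acc
    match m with
    | 0 => simp [pvLoopA, pvDigits60]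
    | m + 1 =>
      rw [pvLoopA, pvDigits60, ih ((m + 1) / 60) (Nat.div_lt_self (Nat.succ_pos m) (by omega))]
      simp

-- Exactly k+1 base-60 digits of n, most-significant-first (with leading table-zeros).
def pvFix : Nat → Nat → List Char
  | 0, n => [pvTable60.getD (n % 60) ' ']
  | k + 1, n => pvTable60.getD (n / 60 ^ (k + 1)) ' ' :: pvFix k (n % 60 ^ (k + 1))

theorem pvMsd_eq_fix (k : Nat) : ∀ n acc, n < 60 ^ (k + 1) →
    pvMsdLoop n (60 ^ k) acc = acc ++ pvFix k n := by
  induction k with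
  | zero =>
    intro n acc hn
    have hn' : n < 60 := by simpa using hn
    rw [pvMsdLoop]
    simp only [pow_zero] at *
    rw [dif_pos (by omega), pvMsdLoop, dif_neg (by omega)]
    simp [pvFix, Nat.mod_eq_of_lt hn']
  | succ k ih =>
    intro n acc hn
    rw [pvMsdLoop, dif_pos (by positivity)]
    have hdiv : 60 ^ (k + 1) / 60 = 60 ^ k := by
      rw [pow_succ, Nat.mul_div_cancel _ (by omega)]
    rw [hdiv, ih (n % 60 ^ (k + 1)) _ (Nat.mod_lt _ (by positivity))]
    simp [pvFix]

theorem pvFix_shift (k : Nat) : ∀ n, n < 60 ^ (k + 2) →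
    pvFix (k + 1) n = pvFix k (n / 60) ++ [pvTable60.getD (n % 60) ' '] := by
  induction k with
  | zero =>
    intro n hn
    have hd : n / 60 < 60 := by omega
    simp [pvFix, Nat.mod_mod_of_dvd, Nat.mod_eq_of_lt hd]
  | succ k ih =>
    intro n hn
    have h1 : n / 60 / 60 ^ (k + 1) = n / 60 ^ (k + 2) := by
      rw [Nat.div_div_eq_div_mul, ← pow_succ']
    have h2 : n % 60 ^ (k + 2) / 60 = n / 60 % 60 ^ (k + 1) := by
      have := Nat.mod_mul_right_div_self n 60 (60 ^ (k + 1))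
      rwa [← pow_succ'] at this
    have h3 : n % 60 ^ (k + 2) % 60 = n % 60 :=
      Nat.mod_mod_of_dvd n (dvd_pow_self 60 (by omega))
    have h4 : n % 60 ^ (k + 2) < 60 ^ (k + 2) := Nat.mod_lt _ (by positivity)
    calc pvFix (k + 2) n
        = pvTable60.getD (n / 60 ^ (k + 2)) ' ' :: pvFix (k + 1) (n % 60 ^ (k + 2)) := rfl
      _ = pvTable60.getD (n / 60 ^ (k + 2)) ' ' ::
            (pvFix k (n % 60 ^ (k + 2) / 60) ++ [pvTable60.getD (n % 60 ^ (k + 2) % 60) ' ']) := by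
          rw [ih _ h4]
      _ = pvFix (k + 1) (n / 60) ++ [pvTable60.getD (n % 60) ' '] := by
          rw [h2, h3, pvFix, h1]; simp

theorem pvFix_eq_digits (k : Nat) : ∀ n, 60 ^ k ≤ n → n < 60 ^ (k + 1) →
    pvFix k n = pvDigits60 n := by
  induction k with
  | zero =>
    intro n h1 h2
    have h1' : 1 ≤ n := by simpa using h1
    have h2' : n < 60 := by simpa using h2
    obtain ⟨m, rfl⟩ : ∃ m, n = m + 1 := ⟨n - 1, by omega⟩
    have hdiv : (m + 1) / 60 = 0 := by omega
    rw [pvDigits60, hdiv, pvDigits60]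
    simp [pvFix]
  | succ k ih =>
    intro n h1 h2
    have hlow : 60 ^ k ≤ n / 60 := Nat.le_div_iff_mul_le (by omega) |>.2 (by rw [← pow_succ]; exact h1)
    have hhigh : n / 60 < 60 ^ (k + 1) := Nat.div_lt_iff_lt_mul (by omega) |>.2 (by rw [← pow_succ]; exact h2)
    have hn : 0 < n := lt_of_lt_of_le (by positivity) h1
    obtain ⟨m, rfl⟩ := Nat.exists_eq_add_of_lt hn
    rw [show 0 + m + 1 = m + 1 by omega] at *
    rw [pvFix_shift k _ h2, ih _ hlow hhigh, pvDigits60]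

theorem pvPowLoop_spec (n : Nat) : ∀ p, 0 < p → (∃ j, p = 60 ^ j) → p ≤ n →
    ∃ k, pvPowLoop n p = 60 ^ k ∧ 60 ^ k ≤ n ∧ n < 60 ^ (k + 1) := by
  have key : ∀ m p, n / 60 + 1 - p ≤ m → 0 < p → (∃ j, p = 60 ^ j) → p ≤ n →
      ∃ k, pvPowLoop n p = 60 ^ k ∧ 60 ^ k ≤ n ∧ n < 60 ^ (k + 1) := by
    intro m
    induction m with
    | zero =>
      intro p hm hp hj hle
      rw [pvPowLoop, dif_neg (by omega)]
      obtain ⟨j, rfl⟩ := hj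
      refine ⟨j, rfl, hle, ?_⟩
      have h60 : n / 60 < 60 ^ j := by omega
      have := (Nat.div_lt_iff_lt_mul (by omega : (0:ℕ) < 60)).1 h60
      rw [pow_succ]; omega
    | succ m ih =>
      intro p hm hp hj hle
      rw [pvPowLoop]
      by_cases hc : 0 < p ∧ p ≤ n / 60
      · rw [dif_pos hc]
        obtain ⟨j, rfl⟩ := hj
        refine ih _ (by omega) (by positivity) ⟨j + 1, by rw [pow_succ]⟩ ?_
        calc 60 ^ j * 60 ≤ n / 60 * 60 := by omega
          _ ≤ n := Nat.div_mul_le_self n 60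
      · rw [dif_neg hc]
        obtain ⟨j, rfl⟩ := hj
        refine ⟨j, rfl, hle, ?_⟩
        have h60 : n / 60 < 60 ^ j := by omega
        have := (Nat.div_lt_iff_lt_mul (by omega : (0:ℕ) < 60)).1 h60
        rw [pow_succ]; omega
  exact fun p => key (n / 60 + 1 - p) p le_rfl

theorem pvMsd_result (n : Nat) (hn : 0 < n) :
    pvMsdLoop n (pvPowLoop n 1) [] = pvDigits60 n := by
  obtain ⟨k, hk, h1, h2⟩ := pvPowLoop_spec n 1 (by omega) ⟨0, rfl⟩ hn
  rw [hk, pvMsd_eq_fix k n [] h2, pvFix_eq_digits k n h1 h2]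
  simp

-- ===== VERDICT (by name: the statement is the Claim_ definition above) =====
theorem convert_10_2_60_py_spec : Claim_equal_convert_10_2_60_py := by
  intro id_16 padding _ hpre
  obtain ⟨n, hn, _⟩ := hpre
  unfold Spec_convert_10_2_60_py convert_10_2_60_py convert_10_2_60_py_alt
  rw [hn]
  have hout : (if n.toNat ≠ 0 then pvMsdLoop n.toNat (pvPowLoop n.toNat 1) [] else []) = pvDigits60 n.toNat := by
    by_cases h0 : n.toNat = 0
    · simp [h0, pvDigits60]
    · rw [if_pos h0, pvMsd_result _ (by omega)]
  cases padding with
  | none => simp only [hout, pvLoopA_eq]; simp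
  | some p =>
    by_cases hp : p = 0
    · simp only [hp]
      simp only [hout, pvLoopA_eq]
      simp
    · simp only [hp, ne_eq, not_false_eq_true, if_true, hout, pvLoopA_eq, List.nil_append]
      congr 1
      rw [List.reverse_append, List.reverse_reverse, List.reverse_replicate, List.length_reverse]
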